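-- pv_equiv track=rewrite | github.com/tothedarktowercame/futon6 | scripts/verify-p4-n4-sos-rich.py | enum_even_basis
-- ===== SOURCE A (Python) =====
-- def enum_even_basis(max_deg):
--     """Enumerate monomials with even a3, b3 powers, split into ee and oo blocks."""
--     even_even = []
--     odd_odd = []
--     for i3 in range(0, max_deg + 1):
--         for i4 in range(0, max_deg + 1 - i3):
--             for j3 in range(0, max_deg + 1 - i3 - i4):
--                 for j4 in range(0, max_deg + 1 - i3 - i4 - j3):
--                     exp = (i3, i4, j3, j4)
--                     if i3 % 2 == 0 and j3 % 2 == 0: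
--                         even_even.append(exp)
--                     elif i3 % 2 == 1 and j3 % 2 == 1:
--                         odd_odd.append(exp)
--     return even_even, odd_odd
-- ===== SOURCE B (Python) =====
-- def enum_even_basis(max_deg):
--     """Enumerate monomials with even a3, b3 powers, split into ee and oo blocks."""
--     even_even = [(i3, i4, j3, j4)
--                  for i3 in range(0, max_deg + 1, 2)
--                  for i4 in range(0, max_deg + 1 - i3)
--                  for j3 in range(0, max_deg + 1 - i3 - i4, 2)
--                  for j4 in range(0, max_deg + 1 - i3 - i4 - j3)]
--     odd_odd = [(i3, i4, j3, j4)
--                for i3 in range(1, max_deg + 1, 2)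
--                for i4 in range(0, max_deg + 1 - i3)
--                for j3 in range(1, max_deg + 1 - i3 - i4, 2)
--                for j4 in range(0, max_deg + 1 - i3 - i4 - j3)]
--     return even_even, odd_odd
-- ===== Notes on version B (the rewrite author's own statement) =====
-- stated objective: simpler
-- what changed: A's single 4-nested loop over all tuples with a per-tuple parity test and two accumulator appends is replaced by two independent comprehensions whose i3 and j3 ranges step by 2 (from 0 for even_even, from 1 for odd_odd), so mixed-parity tuples are never generated and the parity branch disappears.
import Mathlib
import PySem

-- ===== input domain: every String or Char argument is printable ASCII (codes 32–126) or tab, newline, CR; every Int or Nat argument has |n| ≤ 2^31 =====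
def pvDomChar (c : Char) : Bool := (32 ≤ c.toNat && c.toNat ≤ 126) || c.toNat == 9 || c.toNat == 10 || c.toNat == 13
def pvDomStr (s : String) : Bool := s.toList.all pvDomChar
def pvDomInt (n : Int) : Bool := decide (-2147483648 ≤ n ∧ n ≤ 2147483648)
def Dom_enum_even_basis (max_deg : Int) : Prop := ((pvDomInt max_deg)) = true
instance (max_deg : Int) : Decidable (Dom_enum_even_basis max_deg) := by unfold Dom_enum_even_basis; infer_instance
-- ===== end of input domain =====

-- B replaces A's single 4-nested loop with a parity test by two independent
-- comprehensions over step-2 ranges (no parity branch); objective: simpler.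

-- ===== PORT A =====
def enum_even_basis (max_deg : Int) : (List (Int × Int × Int × Int)) × (List (Int × Int × Int × Int)) :=
  (PySem.List.pyRange 0 (max_deg + 1) 1).foldl (fun st i3 =>
    (PySem.List.pyRange 0 (max_deg + 1 - i3) 1).foldl (fun st i4 =>
      (PySem.List.pyRange 0 (max_deg + 1 - i3 - i4) 1).foldl (fun st j3 =>
        (PySem.List.pyRange 0 (max_deg + 1 - i3 - i4 - j3) 1).foldl (fun st j4 =>
          if PySem.Int.mod i3 2 = 0 ∧ PySem.Int.mod j3 2 = 0 then
            (st.1 ++ [(i3, i4, j3, j4)], st.2)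
          else if PySem.Int.mod i3 2 = 1 ∧ PySem.Int.mod j3 2 = 1 then
            (st.1, st.2 ++ [(i3, i4, j3, j4)])
          else st) st) st) st) ([], [])

-- ===== PORT B =====
def enum_even_basis_alt (max_deg : Int) : (List (Int × Int × Int × Int)) × (List (Int × Int × Int × Int)) :=
  ((PySem.List.pyRange 0 (max_deg + 1) 2).flatMap (fun i3 =>
     (PySem.List.pyRange 0 (max_deg + 1 - i3) 1).flatMap (fun i4 =>
       (PySem.List.pyRange 0 (max_deg + 1 - i3 - i4) 2).flatMap (fun j3 =>
         (PySem.List.pyRange 0 (max_deg + 1 - i3 - i4 - j3) 1).map (fun j4 => (i3, i4, j3, j4))))),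
   (PySem.List.pyRange 1 (max_deg + 1) 2).flatMap (fun i3 =>
     (PySem.List.pyRange 0 (max_deg + 1 - i3) 1).flatMap (fun i4 =>
       (PySem.List.pyRange 1 (max_deg + 1 - i3 - i4) 2).flatMap (fun j3 =>
         (PySem.List.pyRange 0 (max_deg + 1 - i3 - i4 - j3) 1).map (fun j4 => (i3, i4, j3, j4))))))

-- ===== PRECONDITION & SPEC =====
def Spec_enum_even_basis (max_deg : Int) (out : (List (Int × Int × Int × Int)) × (List (Int × Int × Int × Int))) : Prop := out = enum_even_basis_alt max_deg
instance (max_deg : Int) (out : (List (Int × Int × Int × Int)) × (List (Int × Int × Int × Int))) : Decidable (Spec_enum_even_basis max_deg out) := by unfold Spec_enum_even_basis; infer_instance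

-- ===== CLAIM (what is proved, stated in full; the proofs are below) =====
def Claim_equal_enum_even_basis : Prop := ∀ (max_deg : Int), Dom_enum_even_basis max_deg → Spec_enum_even_basis max_deg (enum_even_basis max_deg)

-- ===== LEMMAS AND PROOFS =====

-- folding a function that appends to both components of a pair
theorem pvPairFoldl {α β : Type} (l : List α) (f g : α → List β) (p q : List β) :
    l.foldl (fun st x => (st.1 ++ f x, st.2 ++ g x)) (p, q) = (p ++ l.flatMap f, q ++ l.flatMap g) := by
  induction l generalizing p q with
  | nil => simp
  | cons a t ih => simp [List.foldl_cons, ih, List.append_assoc]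

-- a guarded flatMap is a flatMap over the filtered list
theorem pvFlatMapIf {α β : Type} (l : List α) (P : α → Prop) [DecidablePred P] (h : α → List β) :
    l.flatMap (fun x => if P x then h x else []) = (l.filter (fun x => decide (P x))).flatMap h := by
  induction l with
  | nil => rfl
  | cons a t ih =>
    by_cases hP : P a <;> simp [List.flatMap_cons, hP, ih]

theorem pvFlatMapMap {α β : Type} (l : List α) (f : α → β) :
    l.flatMap (fun x => [f x]) = l.map f := by
  induction l with
  | nil => rfl
  | cons a t ih => simp [List.flatMap_cons, ih]

theorem pvModTwo (i : Int) : PySem.Int.mod i 2 = i % 2 := by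
  simp [PySem.Int.mod, Int.fmod_eq_emod]

theorem pvRangeTwoNil (a b : Int) (h : b ≤ a) : PySem.List.pyRange a b 2 = [] := by
  rw [PySem.List.pyRange_of_pos a b (by norm_num)]
  simp [show ¬ a < b by omega]

theorem pvRangeTwoCons (a b : Int) (h : a < b) : PySem.List.pyRange a b 2 = a :: PySem.List.pyRange (a + 2) b 2 := by
  rw [PySem.List.pyRange_of_pos a b (by norm_num), PySem.List.pyRange_of_pos (a + 2) b (by norm_num)]
  have hc : (if a < b then ((b - a + 2 - 1) / 2).toNat else 0)
      = (if a + 2 < b then ((b - (a + 2) + 2 - 1) / 2).toNat else 0) + 1 := by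
    split <;> split <;> omega
  rw [hc, List.range_succ_eq_map]
  simp only [List.map_cons, List.map_map]
  congr 1
  · push_cast; ring
  · apply List.map_congr_left
    intro k _
    simp only [Function.comp_apply]
    push_cast
    ring

-- the parity filter of a unit-step range is the step-2 range from the same start
theorem pvFilterParity (n : Int) : ∀ (k : Nat) (a : Int), (n - a).toNat = k →
    (PySem.List.pyRange a n 1).filter (fun i => decide (i % 2 = a % 2)) = PySem.List.pyRange a n 2 := by
  intro k
  induction k using Nat.strong_induction_on with
  | _ k ih =>
    intro a hk
    by_cases h1 : n ≤ a
    · rw [PySem.List.pyRange_one_eq_nil h1, pvRangeTwoNil a n h1]; rfl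
    · push_neg at h1
      rw [PySem.List.pyRange_one_cons h1, pvRangeTwoCons a n h1]
      rw [List.filter_cons, if_pos (by simp)]
      congr 1
      by_cases h2 : n ≤ a + 1
      · rw [PySem.List.pyRange_one_eq_nil h2, pvRangeTwoNil (a + 2) n (by omega)]; rfl
      · push_neg at h2
        have hne : ¬ ((a + 1) % 2 = a % 2) := by omega
        rw [PySem.List.pyRange_one_cons h2, List.filter_cons, if_neg (by simpa using hne)]
        have hmod : (fun i : Int => decide (i % 2 = a % 2)) = (fun i : Int => decide (i % 2 = (a + 2) % 2)) := by
          funext i; congr 1; simp only [eq_iff_iff]; omega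
        have h12 : a + 1 + 1 = a + 2 := by ring
        rw [hmod, h12]
        exact ih ((n - (a + 2)).toNat) (by omega) (a + 2) rfl

theorem pvFilterEven (n : Int) :
    (PySem.List.pyRange 0 n 1).filter (fun i => decide (i % 2 = 0)) = PySem.List.pyRange 0 n 2 := by
  have := pvFilterParity n ((n - 0).toNat) 0 rfl
  simpa using this

theorem pvFilterOdd (n : Int) :
    (PySem.List.pyRange 0 n 1).filter (fun i => decide (i % 2 = 1)) = PySem.List.pyRange 1 n 2 := by
  have h1 : (PySem.List.pyRange 1 n 1).filter (fun i => decide (i % 2 = 1)) = PySem.List.pyRange 1 n 2 := by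
    have := pvFilterParity n ((n - 1).toNat) 1 rfl
    simpa using this
  by_cases h : n ≤ 0
  · rw [PySem.List.pyRange_one_eq_nil h, pvRangeTwoNil 1 n (by omega)]; rfl
  · push_neg at h
    rw [PySem.List.pyRange_one_cons h, List.filter_cons]
    norm_num
    exact h1

-- the innermost loop body, per (i3, i4, j3): what gets appended to each side
def pvEE (m i3 i4 j3 : Int) : List (Int × Int × Int × Int) :=
  if i3 % 2 = 0 ∧ j3 % 2 = 0 then
    (PySem.List.pyRange 0 (m + 1 - i3 - i4 - j3) 1).map (fun j4 => (i3, i4, j3, j4))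
  else []

def pvOO (m i3 i4 j3 : Int) : List (Int × Int × Int × Int) :=
  if i3 % 2 = 1 ∧ j3 % 2 = 1 then
    (PySem.List.pyRange 0 (m + 1 - i3 - i4 - j3) 1).map (fun j4 => (i3, i4, j3, j4))
  else []

theorem pvInner (m i3 i4 j3 : Int) (p q : List (Int × Int × Int × Int)) :
    (PySem.List.pyRange 0 (m + 1 - i3 - i4 - j3) 1).foldl (fun st j4 =>
      if PySem.Int.mod i3 2 = 0 ∧ PySem.Int.mod j3 2 = 0 then
        (st.1 ++ [(i3, i4, j3, j4)], st.2)
      else if PySem.Int.mod i3 2 = 1 ∧ PySem.Int.mod j3 2 = 1 then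
        (st.1, st.2 ++ [(i3, i4, j3, j4)])
      else st) (p, q)
    = (p ++ pvEE m i3 i4 j3, q ++ pvOO m i3 i4 j3) := by
  simp only [pvModTwo]
  have hstep : (fun (st : List (Int × Int × Int × Int) × List (Int × Int × Int × Int)) (j4 : Int) =>
      if i3 % 2 = 0 ∧ j3 % 2 = 0 then (st.1 ++ [(i3, i4, j3, j4)], st.2)
      else if i3 % 2 = 1 ∧ j3 % 2 = 1 then (st.1, st.2 ++ [(i3, i4, j3, j4)])
      else st)
      = (fun st j4 =>
        (st.1 ++ (if i3 % 2 = 0 ∧ j3 % 2 = 0 then [(i3, i4, j3, j4)] else []),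
         st.2 ++ (if i3 % 2 = 1 ∧ j3 % 2 = 1 then [(i3, i4, j3, j4)] else []))) := by
    funext st j4
    rcases st with ⟨p', q'⟩
    by_cases h1 : i3 % 2 = 0 ∧ j3 % 2 = 0
    · have h2 : ¬ (i3 % 2 = 1 ∧ j3 % 2 = 1) := by omega
      simp only [if_pos h1, if_neg h2, List.append_nil]
    · by_cases h2 : i3 % 2 = 1 ∧ j3 % 2 = 1
      · simp only [if_neg h1, if_pos h2, List.append_nil]
      · simp only [if_neg h1, if_neg h2, List.append_nil]
  rw [hstep, pvPairFoldl]
  unfold pvEE pvOO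
  by_cases h1 : i3 % 2 = 0 ∧ j3 % 2 = 0
  · have h2 : ¬ (i3 % 2 = 1 ∧ j3 % 2 = 1) := by omega
    simp only [if_pos h1, if_neg h2]
    simp [pvFlatMapMap]
  · by_cases h2 : i3 % 2 = 1 ∧ j3 % 2 = 1
    · simp only [if_neg h1, if_pos h2]
      simp [pvFlatMapMap]
    · simp only [if_neg h1, if_neg h2]
      simp

theorem pvUnroll (m : Int) :
    enum_even_basis m =
      ((PySem.List.pyRange 0 (m + 1) 1).flatMap (fun i3 =>
        (PySem.List.pyRange 0 (m + 1 - i3) 1).flatMap (fun i4 =>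
          (PySem.List.pyRange 0 (m + 1 - i3 - i4) 1).flatMap (fun j3 => pvEE m i3 i4 j3))),
       (PySem.List.pyRange 0 (m + 1) 1).flatMap (fun i3 =>
        (PySem.List.pyRange 0 (m + 1 - i3) 1).flatMap (fun i4 =>
          (PySem.List.pyRange 0 (m + 1 - i3 - i4) 1).flatMap (fun j3 => pvOO m i3 i4 j3)))) := by
  unfold enum_even_basis
  have hj3 : ∀ (i3 i4 : Int) (st : List (Int × Int × Int × Int) × List (Int × Int × Int × Int)),
      (PySem.List.pyRange 0 (m + 1 - i3 - i4) 1).foldl (fun st j3 =>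
        (PySem.List.pyRange 0 (m + 1 - i3 - i4 - j3) 1).foldl (fun st j4 =>
          if PySem.Int.mod i3 2 = 0 ∧ PySem.Int.mod j3 2 = 0 then
            (st.1 ++ [(i3, i4, j3, j4)], st.2)
          else if PySem.Int.mod i3 2 = 1 ∧ PySem.Int.mod j3 2 = 1 then
            (st.1, st.2 ++ [(i3, i4, j3, j4)])
          else st) st) st
      = (st.1 ++ (PySem.List.pyRange 0 (m + 1 - i3 - i4) 1).flatMap (fun j3 => pvEE m i3 i4 j3),
         st.2 ++ (PySem.List.pyRange 0 (m + 1 - i3 - i4) 1).flatMap (fun j3 => pvOO m i3 i4 j3)) := by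
    intro i3 i4 st
    rcases st with ⟨p, q⟩
    rw [show (fun (st : List (Int × Int × Int × Int) × List (Int × Int × Int × Int)) (j3 : Int) =>
        (PySem.List.pyRange 0 (m + 1 - i3 - i4 - j3) 1).foldl (fun st j4 =>
          if PySem.Int.mod i3 2 = 0 ∧ PySem.Int.mod j3 2 = 0 then
            (st.1 ++ [(i3, i4, j3, j4)], st.2)
          else if PySem.Int.mod i3 2 = 1 ∧ PySem.Int.mod j3 2 = 1 then
            (st.1, st.2 ++ [(i3, i4, j3, j4)])
          else st) st)
        = (fun st j3 => (st.1 ++ pvEE m i3 i4 j3, st.2 ++ pvOO m i3 i4 j3)) from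
      funext fun st => funext fun j3 => by rcases st with ⟨p', q'⟩; exact pvInner m i3 i4 j3 p' q']
    exact pvPairFoldl _ _ _ p q
  have hi4 : ∀ (i3 : Int) (st : List (Int × Int × Int × Int) × List (Int × Int × Int × Int)),
      (PySem.List.pyRange 0 (m + 1 - i3) 1).foldl (fun st i4 =>
        (PySem.List.pyRange 0 (m + 1 - i3 - i4) 1).foldl (fun st j3 =>
          (PySem.List.pyRange 0 (m + 1 - i3 - i4 - j3) 1).foldl (fun st j4 =>
            if PySem.Int.mod i3 2 = 0 ∧ PySem.Int.mod j3 2 = 0 then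
              (st.1 ++ [(i3, i4, j3, j4)], st.2)
            else if PySem.Int.mod i3 2 = 1 ∧ PySem.Int.mod j3 2 = 1 then
              (st.1, st.2 ++ [(i3, i4, j3, j4)])
            else st) st) st) st
      = (st.1 ++ (PySem.List.pyRange 0 (m + 1 - i3) 1).flatMap (fun i4 =>
          (PySem.List.pyRange 0 (m + 1 - i3 - i4) 1).flatMap (fun j3 => pvEE m i3 i4 j3)),
         st.2 ++ (PySem.List.pyRange 0 (m + 1 - i3) 1).flatMap (fun i4 =>
          (PySem.List.pyRange 0 (m + 1 - i3 - i4) 1).flatMap (fun j3 => pvOO m i3 i4 j3))) := by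
    intro i3 st
    rcases st with ⟨p, q⟩
    rw [show (fun (st : List (Int × Int × Int × Int) × List (Int × Int × Int × Int)) (i4 : Int) =>
        (PySem.List.pyRange 0 (m + 1 - i3 - i4) 1).foldl (fun st j3 =>
          (PySem.List.pyRange 0 (m + 1 - i3 - i4 - j3) 1).foldl (fun st j4 =>
            if PySem.Int.mod i3 2 = 0 ∧ PySem.Int.mod j3 2 = 0 then
              (st.1 ++ [(i3, i4, j3, j4)], st.2)
            else if PySem.Int.mod i3 2 = 1 ∧ PySem.Int.mod j3 2 = 1 then
              (st.1, st.2 ++ [(i3, i4, j3, j4)])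
            else st) st) st)
        = (fun st i4 => (st.1 ++ (PySem.List.pyRange 0 (m + 1 - i3 - i4) 1).flatMap (fun j3 => pvEE m i3 i4 j3),
                         st.2 ++ (PySem.List.pyRange 0 (m + 1 - i3 - i4) 1).flatMap (fun j3 => pvOO m i3 i4 j3))) from
      funext fun st => funext fun i4 => hj3 i3 i4 st]
    exact pvPairFoldl _ _ _ p q
  rw [show (fun (st : List (Int × Int × Int × Int) × List (Int × Int × Int × Int)) (i3 : Int) =>
      (PySem.List.pyRange 0 (m + 1 - i3) 1).foldl (fun st i4 =>
        (PySem.List.pyRange 0 (m + 1 - i3 - i4) 1).foldl (fun st j3 =>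
          (PySem.List.pyRange 0 (m + 1 - i3 - i4 - j3) 1).foldl (fun st j4 =>
            if PySem.Int.mod i3 2 = 0 ∧ PySem.Int.mod j3 2 = 0 then
              (st.1 ++ [(i3, i4, j3, j4)], st.2)
            else if PySem.Int.mod i3 2 = 1 ∧ PySem.Int.mod j3 2 = 1 then
              (st.1, st.2 ++ [(i3, i4, j3, j4)])
            else st) st) st) st)
      = (fun st i3 => (st.1 ++ (PySem.List.pyRange 0 (m + 1 - i3) 1).flatMap (fun i4 =>
          (PySem.List.pyRange 0 (m + 1 - i3 - i4) 1).flatMap (fun j3 => pvEE m i3 i4 j3)),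
                       st.2 ++ (PySem.List.pyRange 0 (m + 1 - i3) 1).flatMap (fun i4 =>
          (PySem.List.pyRange 0 (m + 1 - i3 - i4) 1).flatMap (fun j3 => pvOO m i3 i4 j3)))) from
    funext fun st => funext fun i3 => hi4 i3 st]
  rw [pvPairFoldl]
  simp

-- ee component: pull the parity guards out as step-2 ranges
theorem pvEEside (m : Int) :
    (PySem.List.pyRange 0 (m + 1) 1).flatMap (fun i3 =>
      (PySem.List.pyRange 0 (m + 1 - i3) 1).flatMap (fun i4 =>
        (PySem.List.pyRange 0 (m + 1 - i3 - i4) 1).flatMap (fun j3 => pvEE m i3 i4 j3)))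
    = (PySem.List.pyRange 0 (m + 1) 2).flatMap (fun i3 =>
        (PySem.List.pyRange 0 (m + 1 - i3) 1).flatMap (fun i4 =>
          (PySem.List.pyRange 0 (m + 1 - i3 - i4) 2).flatMap (fun j3 =>
            (PySem.List.pyRange 0 (m + 1 - i3 - i4 - j3) 1).map (fun j4 => (i3, i4, j3, j4))))) := by
  have hinner : ∀ i3 i4 : Int,
      (PySem.List.pyRange 0 (m + 1 - i3 - i4) 1).flatMap (fun j3 => pvEE m i3 i4 j3)
      = if i3 % 2 = 0 then
          (PySem.List.pyRange 0 (m + 1 - i3 - i4) 2).flatMap (fun j3 =>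
            (PySem.List.pyRange 0 (m + 1 - i3 - i4 - j3) 1).map (fun j4 => (i3, i4, j3, j4)))
        else [] := by
    intro i3 i4
    by_cases hi : i3 % 2 = 0
    · rw [if_pos hi]
      have : (fun j3 => pvEE m i3 i4 j3)
          = (fun j3 : Int => if j3 % 2 = 0 then
              (PySem.List.pyRange 0 (m + 1 - i3 - i4 - j3) 1).map (fun j4 => (i3, i4, j3, j4)) else []) := by
        funext j3; unfold pvEE; simp [hi]
      rw [this, pvFlatMapIf, pvFilterEven]
    · rw [if_neg hi]
      have : (fun j3 => pvEE m i3 i4 j3) = (fun _ : Int => ([] : List (Int × Int × Int × Int))) := by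
        funext j3; unfold pvEE; simp [hi]
      simp [this]
  have houter : (fun i3 : Int =>
      (PySem.List.pyRange 0 (m + 1 - i3) 1).flatMap (fun i4 =>
        (PySem.List.pyRange 0 (m + 1 - i3 - i4) 1).flatMap (fun j3 => pvEE m i3 i4 j3)))
      = (fun i3 : Int => if i3 % 2 = 0 then
          (PySem.List.pyRange 0 (m + 1 - i3) 1).flatMap (fun i4 =>
            (PySem.List.pyRange 0 (m + 1 - i3 - i4) 2).flatMap (fun j3 =>
              (PySem.List.pyRange 0 (m + 1 - i3 - i4 - j3) 1).map (fun j4 => (i3, i4, j3, j4))))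
        else []) := by
    funext i3
    by_cases hi : i3 % 2 = 0
    · simp only [if_pos hi]
      refine List.flatMap_congr ?_
      intro i4 _
      rw [hinner i3 i4, if_pos hi]
    · simp only [if_neg hi]
      have : ∀ i4 ∈ PySem.List.pyRange 0 (m + 1 - i3) 1,
          (PySem.List.pyRange 0 (m + 1 - i3 - i4) 1).flatMap (fun j3 => pvEE m i3 i4 j3) = [] := by
        intro i4 _
        rw [hinner i3 i4, if_neg hi]
      simp [List.flatMap_congr this]
  rw [houter, pvFlatMapIf, pvFilterEven]

-- oo component: pull the parity guards out as step-2 ranges starting at 1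
theorem pvOOside (m : Int) :
    (PySem.List.pyRange 0 (m + 1) 1).flatMap (fun i3 =>
      (PySem.List.pyRange 0 (m + 1 - i3) 1).flatMap (fun i4 =>
        (PySem.List.pyRange 0 (m + 1 - i3 - i4) 1).flatMap (fun j3 => pvOO m i3 i4 j3)))
    = (PySem.List.pyRange 1 (m + 1) 2).flatMap (fun i3 =>
        (PySem.List.pyRange 0 (m + 1 - i3) 1).flatMap (fun i4 =>
          (PySem.List.pyRange 1 (m + 1 - i3 - i4) 2).flatMap (fun j3 =>
            (PySem.List.pyRange 0 (m + 1 - i3 - i4 - j3) 1).map (fun j4 => (i3, i4, j3, j4))))) := by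
  have hinner : ∀ i3 i4 : Int,
      (PySem.List.pyRange 0 (m + 1 - i3 - i4) 1).flatMap (fun j3 => pvOO m i3 i4 j3)
      = if i3 % 2 = 1 then
          (PySem.List.pyRange 1 (m + 1 - i3 - i4) 2).flatMap (fun j3 =>
            (PySem.List.pyRange 0 (m + 1 - i3 - i4 - j3) 1).map (fun j4 => (i3, i4, j3, j4)))
        else [] := by
    intro i3 i4
    by_cases hi : i3 % 2 = 1
    · rw [if_pos hi]
      have : (fun j3 => pvOO m i3 i4 j3)
          = (fun j3 : Int => if j3 % 2 = 1 then
              (PySem.List.pyRange 0 (m + 1 - i3 - i4 - j3) 1).map (fun j4 => (i3, i4, j3, j4)) else []) := by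
        funext j3; unfold pvOO; simp [hi]
      rw [this, pvFlatMapIf, pvFilterOdd]
    · rw [if_neg hi]
      have : (fun j3 => pvOO m i3 i4 j3) = (fun _ : Int => ([] : List (Int × Int × Int × Int))) := by
        funext j3; unfold pvOO; simp [hi]
      simp [this]
  have houter : (fun i3 : Int =>
      (PySem.List.pyRange 0 (m + 1 - i3) 1).flatMap (fun i4 =>
        (PySem.List.pyRange 0 (m + 1 - i3 - i4) 1).flatMap (fun j3 => pvOO m i3 i4 j3)))
      = (fun i3 : Int => if i3 % 2 = 1 then
          (PySem.List.pyRange 0 (m + 1 - i3) 1).flatMap (fun i4 =>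
            (PySem.List.pyRange 1 (m + 1 - i3 - i4) 2).flatMap (fun j3 =>
              (PySem.List.pyRange 0 (m + 1 - i3 - i4 - j3) 1).map (fun j4 => (i3, i4, j3, j4))))
        else []) := by
    funext i3
    by_cases hi : i3 % 2 = 1
    · simp only [if_pos hi]
      refine List.flatMap_congr ?_
      intro i4 _
      rw [hinner i3 i4, if_pos hi]
    · simp only [if_neg hi]
      have : ∀ i4 ∈ PySem.List.pyRange 0 (m + 1 - i3) 1,
          (PySem.List.pyRange 0 (m + 1 - i3 - i4) 1).flatMap (fun j3 => pvOO m i3 i4 j3) = [] := by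
        intro i4 _
        rw [hinner i3 i4, if_neg hi]
      simp [List.flatMap_congr this]
  rw [houter, pvFlatMapIf, pvFilterOdd]

-- ===== VERDICT (by name: the statement is the Claim_ definition above) =====
theorem enum_even_basis_spec : Claim_equal_enum_even_basis := by
  intro m _
  unfold Spec_enum_even_basis enum_even_basis_alt
  rw [pvUnroll m, pvEEside m, pvOOside m]
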